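-- pv_equiv track=rewrite | github.com/icemoon97/Kessler-Syndrome | main.py | reorderObjectList
-- ===== SOURCE A (Python) =====
-- background = [100]
--
-- ship = [1,5]
--
-- def reorderObjectList(object_list):
--     newObject_list = []
--     for i in range(3):
--         for j in range(0, len(object_list), 8):
--             object_number = object_list[j+4]
--             if object_number in background and i == 0:
--                 newObject_list += object_list[j:j+8]
--             elif object_number in ship and i == 1:
--                 newObject_list += object_list[j:j+8]
--             elif object_number not in ship and object_number not in background and i == 2:
--                 newObject_list += object_list[j:j+8]
--     return newObject_list
-- ===== SOURCE B (Python) =====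
-- background = [100]
--
-- ship = [1,5]
--
-- def reorderObjectList(object_list):
--     bg, ships, other = [], [], []
--     for j in range(0, len(object_list), 8):
--         n = object_list[j+4]
--         if n in background:
--             bg += object_list[j:j+8]
--         elif n in ship:
--             ships += object_list[j:j+8]
--         else:
--             other += object_list[j:j+8]
--     return bg + ships + other
-- ===== Notes on version B (the rewrite author's own statement) =====
-- stated objective: simpler
-- what changed: A scans the whole list three times (one filtering pass per category, selected by an outer i-loop); B makes a single pass that partitions the 8-element chunks into three buckets (background/ship/other) and concatenates them.
import Mathlib
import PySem

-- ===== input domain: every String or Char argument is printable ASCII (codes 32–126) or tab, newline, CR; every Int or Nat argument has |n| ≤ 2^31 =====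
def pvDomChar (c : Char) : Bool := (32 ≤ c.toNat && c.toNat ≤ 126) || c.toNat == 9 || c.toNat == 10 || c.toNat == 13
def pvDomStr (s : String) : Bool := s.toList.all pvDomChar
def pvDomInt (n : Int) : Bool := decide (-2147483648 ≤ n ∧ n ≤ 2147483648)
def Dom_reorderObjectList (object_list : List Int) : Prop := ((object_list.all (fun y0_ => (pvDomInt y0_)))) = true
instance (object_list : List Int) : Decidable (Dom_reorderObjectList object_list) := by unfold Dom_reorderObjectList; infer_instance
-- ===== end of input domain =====

-- B replaces A's three category-filtering passes over the list by one pass that partitions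
-- the 8-element chunks into three buckets (background/ship/other) and concatenates them.

def pvBackground : List Int := [100]

def pvShip : List Int := [1, 5]

-- ===== PORT A =====
-- literal port of A: outer loop i in range(3), inner loop over chunk starts j in range(0, len, 8);
-- the pyGetD default 0 is unreachable under Pre_ (Python raises IndexError exactly there).
def reorderObjectList (object_list : List Int) : List Int :=
  (PySem.List.pyRange 0 3 1).foldl (fun newObject_list i =>
    (PySem.List.pyRange 0 (object_list.length : Int) 8).foldl (fun acc j =>
      let object_number := PySem.List.pyGetD object_list (j + 4) 0
      if object_number ∈ pvBackground ∧ i = 0 then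
        acc ++ PySem.List.slice object_list (some j) (some (j + 8))
      else if object_number ∈ pvShip ∧ i = 1 then
        acc ++ PySem.List.slice object_list (some j) (some (j + 8))
      else if object_number ∉ pvShip ∧ object_number ∉ pvBackground ∧ i = 2 then
        acc ++ PySem.List.slice object_list (some j) (some (j + 8))
      else acc) newObject_list) []

-- ===== PORT B =====
-- literal port of B: one pass building the triple (bg, ships, other), then concatenation.
def reorderObjectList_alt (object_list : List Int) : List Int :=
  let t := (PySem.List.pyRange 0 (object_list.length : Int) 8).foldl
    (fun (t : List Int × List Int × List Int) j =>
      let n := PySem.List.pyGetD object_list (j + 4) 0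
      if n ∈ pvBackground then
        (t.1 ++ PySem.List.slice object_list (some j) (some (j + 8)), t.2.1, t.2.2)
      else if n ∈ pvShip then
        (t.1, t.2.1 ++ PySem.List.slice object_list (some j) (some (j + 8)), t.2.2)
      else
        (t.1, t.2.1, t.2.2 ++ PySem.List.slice object_list (some j) (some (j + 8))))
    ([], [], [])
  t.1 ++ (t.2.1 ++ t.2.2)

-- ===== PRECONDITION & SPEC =====
-- Pre_ excludes exactly the inputs on which both Pythons raise IndexError at object_list[j+4]:
-- lists whose length mod 8 is 1, 2, 3 or 4 (the last partial chunk has no 5th element).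
def Pre_reorderObjectList (object_list : List Int) : Prop :=
  object_list.length % 8 = 0 ∨ 5 ≤ object_list.length % 8
instance (object_list : List Int) : Decidable (Pre_reorderObjectList object_list) := by
  unfold Pre_reorderObjectList; infer_instance

def pvWitness_reorderObjectList : List Int :=
  [0, 0, 0, 0, 100, 0, 0, 0, 1, 1, 1, 1, 7, 1, 1, 1]

def Spec_reorderObjectList (object_list : List Int) (out : List Int) : Prop := out = reorderObjectList_alt object_list
instance (object_list : List Int) (out : List Int) : Decidable (Spec_reorderObjectList object_list out) := by unfold Spec_reorderObjectList; infer_instance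

-- ===== CLAIM (what is proved, stated in full; the proofs are below) =====
def Claim_equal_reorderObjectList : Prop := ∀ (object_list : List Int), Dom_reorderObjectList object_list → Pre_reorderObjectList object_list → Spec_reorderObjectList object_list (reorderObjectList object_list)

-- ===== LEMMAS AND PROOFS =====

-- proof-side names for the shared pieces of both ports
def pvJs (xs : List Int) : List Int := PySem.List.pyRange 0 (xs.length : Int) 8
def pvChunk (xs : List Int) (j : Int) : List Int := PySem.List.slice xs (some j) (some (j + 8))
def pvN (xs : List Int) (j : Int) : Int := PySem.List.pyGetD xs (j + 4) 0

-- A's inner-loop body at a fixed pass i (definitionally the lambda in the port)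
def pvStepA (xs : List Int) (i : Int) (acc : List Int) (j : Int) : List Int :=
  if PySem.List.pyGetD xs (j + 4) 0 ∈ pvBackground ∧ i = 0 then acc ++ PySem.List.slice xs (some j) (some (j + 8))
  else if PySem.List.pyGetD xs (j + 4) 0 ∈ pvShip ∧ i = 1 then
    acc ++ PySem.List.slice xs (some j) (some (j + 8))
  else if PySem.List.pyGetD xs (j + 4) 0 ∉ pvShip ∧ PySem.List.pyGetD xs (j + 4) 0 ∉ pvBackground ∧ i = 2 then
    acc ++ PySem.List.slice xs (some j) (some (j + 8))
  else acc

def pvGA (xs : List Int) (i : Int) (j : Int) : List Int := pvStepA xs i [] j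

-- B's loop body (definitionally the lambda in the port)
def pvStepB (xs : List Int) (t : List Int × List Int × List Int) (j : Int) :
    List Int × List Int × List Int :=
  if PySem.List.pyGetD xs (j + 4) 0 ∈ pvBackground then
    (t.1 ++ PySem.List.slice xs (some j) (some (j + 8)), t.2.1, t.2.2)
  else if PySem.List.pyGetD xs (j + 4) 0 ∈ pvShip then
    (t.1, t.2.1 ++ PySem.List.slice xs (some j) (some (j + 8)), t.2.2)
  else (t.1, t.2.1, t.2.2 ++ PySem.List.slice xs (some j) (some (j + 8)))

def pvGB0 (xs : List Int) (j : Int) : List Int := if pvN xs j ∈ pvBackground then pvChunk xs j else []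
def pvGB1 (xs : List Int) (j : Int) : List Int :=
  if pvN xs j ∉ pvBackground ∧ pvN xs j ∈ pvShip then pvChunk xs j else []
def pvGB2 (xs : List Int) (j : Int) : List Int :=
  if pvN xs j ∉ pvBackground ∧ pvN xs j ∉ pvShip then pvChunk xs j else []

theorem pvStepA_eq (xs : List Int) (i : Int) (acc : List Int) (j : Int) :
    pvStepA xs i acc j = acc ++ pvGA xs i j := by
  unfold pvGA pvStepA
  split_ifs <;> simp

theorem pvA_pass (xs : List Int) (i : Int) (js : List Int) (acc : List Int) :
    js.foldl (pvStepA xs i) acc = acc ++ js.flatMap (pvGA xs i) := by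
  induction js generalizing acc with
  | nil => simp
  | cons j js ih => simp [pvStepA_eq, ih, List.append_assoc]

theorem pvB_pass (xs : List Int) (js : List Int) (t : List Int × List Int × List Int) :
    js.foldl (pvStepB xs) t
      = (t.1 ++ js.flatMap (pvGB0 xs), t.2.1 ++ js.flatMap (pvGB1 xs),
         t.2.2 ++ js.flatMap (pvGB2 xs)) := by
  induction js generalizing t with
  | nil => simp
  | cons j js ih =>
    simp only [List.foldl_cons, List.flatMap_cons, ih]
    unfold pvStepB pvGB0 pvGB1 pvGB2 pvN pvChunk
    split_ifs <;> simp_all [List.append_assoc]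

theorem pvA_eq (xs : List Int) :
    reorderObjectList xs
      = (pvJs xs).flatMap (pvGA xs 0)
        ++ ((pvJs xs).flatMap (pvGA xs 1) ++ (pvJs xs).flatMap (pvGA xs 2)) := by
  show (pvJs xs).foldl (pvStepA xs 2)
      ((pvJs xs).foldl (pvStepA xs 1) ((pvJs xs).foldl (pvStepA xs 0) [])) = _
  rw [pvA_pass, pvA_pass, pvA_pass]
  simp [List.append_assoc]

theorem pvB_eq (xs : List Int) :
    reorderObjectList_alt xs
      = (pvJs xs).flatMap (pvGB0 xs)
        ++ ((pvJs xs).flatMap (pvGB1 xs) ++ (pvJs xs).flatMap (pvGB2 xs)) := by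
  show (let t := (pvJs xs).foldl (pvStepB xs) ([], [], []); t.1 ++ (t.2.1 ++ t.2.2)) = _
  rw [pvB_pass]
  rfl

theorem pvGA0_eq (xs : List Int) (j : Int) : pvGA xs 0 j = pvGB0 xs j := by
  unfold pvGA pvStepA pvGB0 pvN pvChunk
  simp [pvBackground, pvShip]

theorem pvGA1_eq (xs : List Int) (j : Int) : pvGA xs 1 j = pvGB1 xs j := by
  unfold pvGA pvStepA pvGB1 pvN pvChunk
  simp [pvBackground, pvShip]
  split_ifs <;> simp_all

theorem pvGA2_eq (xs : List Int) (j : Int) : pvGA xs 2 j = pvGB2 xs j := by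
  unfold pvGA pvStepA pvGB2 pvN pvChunk
  simp [pvBackground, pvShip]
  split_ifs <;> simp_all

-- ===== VERDICT (by name: the statement is the Claim_ definition above) =====
theorem reorderObjectList_spec : Claim_equal_reorderObjectList := by
  intro xs _ _
  show reorderObjectList xs = reorderObjectList_alt xs
  rw [pvA_eq, pvB_eq]
  congr 1
  · exact List.flatMap_congr (fun j _ => pvGA0_eq xs j)
  congr 1
  · exact List.flatMap_congr (fun j _ => pvGA1_eq xs j)
  · exact List.flatMap_congr (fun j _ => pvGA2_eq xs j)
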